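-- pv_equiv track=rewrite | github.com/koyeliaghosh/ProcureSense-Kiro | src/context/context_manager.py | _compress_historical_patterns
-- ===== SOURCE A (Python) =====
-- from typing import Dict, List, Any, Optional
--
-- def _compress_historical_patterns(patterns: List[str]) -> List[str]:
--     """Compress historical patterns to most relevant"""
--     if len(patterns) <= 2:
--         return patterns
--
--     # Prioritize recent and successful patterns
--     prioritized = []
--     seasonal = []
--     negotiation = []
--
--     for pattern in patterns:
--         if "seasonal" in pattern.lower():
--             seasonal.append(pattern)
--         elif "negotiation" in pattern.lower():
--             negotiation.append(pattern)
--         else: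
--             prioritized.append(pattern)
--
--     # Keep most relevant from each category
--     result = []
--
--     if negotiation:
--         result.append(negotiation[0])  # Most recent negotiation pattern
--
--     if seasonal:
--         result.append(seasonal[0])  # Most recent seasonal pattern
--
--     # Fill remaining space with other patterns
--     remaining_space = 2 - len(result)
--     if remaining_space > 0 and prioritized:
--         result.extend(prioritized[:remaining_space])
--
--     return result[:2]  # Limit to 2 patterns
-- ===== SOURCE B (Python) =====
-- def _compress_historical_patterns(patterns):
--     """Compress historical patterns to most relevant"""
--     if len(patterns) <= 2:
--         return patterns
--     neg = next((p for p in patterns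
--                 if "negotiation" in p.lower() and "seasonal" not in p.lower()), None)
--     sea = next((p for p in patterns if "seasonal" in p.lower()), None)
--     result = [p for p in (neg, sea) if p is not None]
--     if len(result) < 2:
--         others = [p for p in patterns
--                   if "seasonal" not in p.lower() and "negotiation" not in p.lower()]
--         result += others[:2 - len(result)]
--     return result[:2]
-- ===== Notes on version B (the rewrite author's own statement) =====
-- stated objective: idiomatic
-- what changed: Replaces A's single categorizing elif-loop plus staged result assembly by direct targeted extractions: first matching negotiation/seasonal pattern via a first-match search and a comprehension for the uncategorized rest.
import Mathlib
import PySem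

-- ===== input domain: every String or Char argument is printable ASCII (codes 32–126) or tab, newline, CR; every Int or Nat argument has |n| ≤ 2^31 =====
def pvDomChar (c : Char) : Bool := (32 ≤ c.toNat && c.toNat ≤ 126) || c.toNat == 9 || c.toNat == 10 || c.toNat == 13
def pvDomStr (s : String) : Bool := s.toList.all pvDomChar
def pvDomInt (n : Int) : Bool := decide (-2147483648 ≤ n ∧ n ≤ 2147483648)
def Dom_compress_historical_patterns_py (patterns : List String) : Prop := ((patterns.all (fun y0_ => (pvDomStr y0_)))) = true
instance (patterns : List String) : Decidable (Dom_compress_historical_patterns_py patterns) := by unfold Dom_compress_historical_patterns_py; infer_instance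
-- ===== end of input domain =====

-- B replaces A's categorizing elif-loop with direct first-match extractions (idiomatic); same return value, similar cost.
-- ===== PORT A =====
def compress_historical_patterns_py (patterns : List String) : List String :=
  if patterns.length ≤ 2 then patterns
  else
    let st := patterns.foldl
      (fun (acc : List String × List String × List String) pattern =>
        let (prioritized, seasonal, negotiation) := acc
        if PySem.Str.isIn "seasonal" (PySem.Str.lower pattern) then
          (prioritized, seasonal ++ [pattern], negotiation)
        else if PySem.Str.isIn "negotiation" (PySem.Str.lower pattern) then
          (prioritized, seasonal, negotiation ++ [pattern])
        else
          (prioritized ++ [pattern], seasonal, negotiation))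
      ([], [], [])
    let prioritized := st.1
    let seasonal := st.2.1
    let negotiation := st.2.2
    let result :=
      (match negotiation with | [] => [] | x :: _ => [x]) ++
      (match seasonal with | [] => [] | x :: _ => [x])
    let remaining : Int := 2 - result.length
    let result := if remaining > 0 ∧ prioritized ≠ [] then
        result ++ prioritized.take remaining.toNat
      else result
    result.take 2

-- ===== PORT B =====
def compress_historical_patterns_py_alt (patterns : List String) : List String :=
  if patterns.length ≤ 2 then patterns
  else
    let neg := patterns.find? (fun p =>
      PySem.Str.isIn "negotiation" (PySem.Str.lower p) &&
      !PySem.Str.isIn "seasonal" (PySem.Str.lower p))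
    let sea := patterns.find? (fun p => PySem.Str.isIn "seasonal" (PySem.Str.lower p))
    let result := neg.toList ++ sea.toList
    let result := if result.length < 2 then
        let others := patterns.filter (fun p =>
          !PySem.Str.isIn "seasonal" (PySem.Str.lower p) &&
          !PySem.Str.isIn "negotiation" (PySem.Str.lower p))
        result ++ others.take (2 - result.length)
      else result
    result.take 2

-- ===== PRECONDITION & SPEC =====
def Spec_compress_historical_patterns_py (patterns : List String) (out : List String) : Prop := out = compress_historical_patterns_py_alt patterns
instance (patterns : List String) (out : List String) : Decidable (Spec_compress_historical_patterns_py patterns out) := by unfold Spec_compress_historical_patterns_py; infer_instance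

-- ===== CLAIM (what is proved, stated in full; the proofs are below) =====
def Claim_equal_compress_historical_patterns_py : Prop := ∀ (patterns : List String), Dom_compress_historical_patterns_py patterns → Spec_compress_historical_patterns_py patterns (compress_historical_patterns_py patterns)

-- ===== LEMMAS AND PROOFS =====

-- A's loop builds the three category lists; they are filters of the input.
theorem pv_fold_eq (ps pn : String → Bool) (l : List String) (a b c : List String) :
    l.foldl
      (fun (acc : List String × List String × List String) pattern =>
        let (prioritized, seasonal, negotiation) := acc
        if ps pattern then
          (prioritized, seasonal ++ [pattern], negotiation)
        else if pn pattern then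
          (prioritized, seasonal, negotiation ++ [pattern])
        else
          (prioritized ++ [pattern], seasonal, negotiation))
      (a, b, c)
    = (a ++ l.filter (fun p => !ps p && !pn p),
       b ++ l.filter (fun p => ps p),
       c ++ l.filter (fun p => !ps p && pn p)) := by
  induction l generalizing a b c with
  | nil => simp
  | cons x xs ih =>
    simp only [List.foldl_cons, List.filter_cons]
    by_cases hs : ps x = true
    · simp [hs, ih]
    · by_cases hn : pn x = true
      · simp [hs, hn, ih]
      · simp [hs, hn, ih]

-- head-of-filter is find?
theorem pv_head_filter (l : List String) (p : String → Bool) :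
    (match l.filter p with | [] => ([] : List String) | x :: _ => [x])
      = (l.find? p).toList := by
  induction l with
  | nil => simp
  | cons x xs ih =>
    by_cases h : p x = true
    · simp [h]
    · simp [h, ih]

-- find? with the conjuncts commuted
theorem pv_find_comm (l : List String) (ps pn : String → Bool) :
    l.find? (fun p => !ps p && pn p) = l.find? (fun p => pn p && !ps p) := by
  have : (fun p => !ps p && pn p) = (fun p => pn p && !ps p) := by
    funext x; exact Bool.and_comm _ _
  rw [this]

-- the final assembly steps of A and B agree for any first-matches N, S and rest P
theorem pv_assemble (N S : Option String) (P : List String) :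
    (let result := N.toList ++ S.toList
     let remaining : Int := 2 - result.length
     let result := if remaining > 0 ∧ P ≠ [] then
         result ++ P.take remaining.toNat
       else result
     result.take 2)
    =
    (let result := N.toList ++ S.toList
     let result := if result.length < 2 then
         result ++ P.take (2 - result.length)
       else result
     result.take 2) := by
  cases N <;> cases S <;> by_cases hP : P = [] <;>
    simp [hP]

-- ===== VERDICT (by name: the statement is the Claim_ definition above) =====
theorem compress_historical_patterns_py_spec : Claim_equal_compress_historical_patterns_py := by
  unfold Claim_equal_compress_historical_patterns_py
  intro patterns _
  unfold Spec_compress_historical_patterns_py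
  unfold compress_historical_patterns_py compress_historical_patterns_py_alt
  by_cases hlen : patterns.length ≤ 2
  · simp [hlen]
  · simp only [hlen, if_false]
    rw [pv_fold_eq (fun p => PySem.Str.isIn "seasonal" (PySem.Str.lower p))
        (fun p => PySem.Str.isIn "negotiation" (PySem.Str.lower p))]
    simp only [List.nil_append]
    rw [pv_head_filter, pv_head_filter,
        pv_find_comm patterns (fun p => PySem.Str.isIn "seasonal" (PySem.Str.lower p))
          (fun p => PySem.Str.isIn "negotiation" (PySem.Str.lower p))]
    exact pv_assemble
      (patterns.find? (fun p =>
        PySem.Str.isIn "negotiation" (PySem.Str.lower p) &&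
        !PySem.Str.isIn "seasonal" (PySem.Str.lower p)))
      (patterns.find? (fun p => PySem.Str.isIn "seasonal" (PySem.Str.lower p)))
      (patterns.filter (fun p =>
        !PySem.Str.isIn "seasonal" (PySem.Str.lower p) &&
        !PySem.Str.isIn "negotiation" (PySem.Str.lower p)))
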